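-- pv_equiv track=rewrite | github.com/sr12blr/times-of-climate-change | generate_site.py | group_by_year
-- ===== SOURCE A (Python) =====
-- def group_by_year(stories):
--     """Group stories by year for archive display"""
--     from collections import OrderedDict
--     grouped = OrderedDict()
--     for story in stories:
--         year = story["date"][:4]
--         if year not in grouped:
--             grouped[year] = []
--         grouped[year].append(story)
--     return list(grouped.items())
-- ===== SOURCE B (Python) =====
-- def group_by_year(stories):
--     """Group stories by year for archive display"""
--     years = list(dict.fromkeys(story["date"][:4] for story in stories))
--     return [(year, [s for s in stories if s["date"][:4] == year]) for year in years]
-- ===== Notes on version B (the rewrite author's own statement) =====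
-- stated objective: simpler
-- what changed: Replaces the single mutating OrderedDict grouping pass with a two-phase shape: an ordered dedup of years (dict.fromkeys) followed by one filtering comprehension per year.
import Mathlib
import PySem

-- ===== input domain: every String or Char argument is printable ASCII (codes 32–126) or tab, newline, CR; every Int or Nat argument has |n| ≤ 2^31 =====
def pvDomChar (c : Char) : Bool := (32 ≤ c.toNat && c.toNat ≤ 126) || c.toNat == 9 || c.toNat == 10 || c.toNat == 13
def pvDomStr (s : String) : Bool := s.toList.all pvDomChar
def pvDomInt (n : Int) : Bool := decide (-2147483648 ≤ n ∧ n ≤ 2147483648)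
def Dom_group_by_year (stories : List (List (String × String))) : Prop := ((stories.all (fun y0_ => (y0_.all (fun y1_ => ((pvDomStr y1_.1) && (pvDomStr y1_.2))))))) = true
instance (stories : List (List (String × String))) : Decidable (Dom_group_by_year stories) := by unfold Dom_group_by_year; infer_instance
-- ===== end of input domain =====

-- B replaces the single mutating OrderedDict pass with an ordered dedup of years followed by one filter per year (objective: simpler).

-- shared helper: story["date"][:4] (first-match dict lookup; "" default never used inside Pre_)
def pvYearOf (story : List (String × String)) : String :=
  PySem.Str.slice (((story.find? (fun p => p.1 == "date")).map (·.2)).getD "") none (some 4)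

-- ===== PORT A =====
def group_by_year (stories : List (List (String × String))) : List (String × (List (List (String × String)))) :=
  (stories.foldl (fun grouped story =>
      let year := pvYearOf story
      let grouped := if grouped.contains year then grouped else grouped.insert year ([] : List (List (String × String)))
      grouped.modify year [] (fun v => v ++ [story]))
    PySem.Dict.empty).items

-- ===== PORT B =====
def group_by_year_alt (stories : List (List (String × String))) : List (String × (List (List (String × String)))) :=
  let years := PySem.List.dedup (stories.map (fun story => pvYearOf story))
  years.map (fun year => (year, stories.filter (fun s => pvYearOf s == year)))

-- ===== PRECONDITION & SPEC =====
-- Pre_ excludes stories without a "date" key, on which Python A (and B) raise KeyError.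
def Pre_group_by_year (stories : List (List (String × String))) : Prop :=
  ∀ s ∈ stories, (s.find? (fun p => p.1 == "date")).isSome = true
instance (stories : List (List (String × String))) : Decidable (Pre_group_by_year stories) := by unfold Pre_group_by_year; infer_instance
def pvWitness_group_by_year : (List (List (String × String))) :=
  [[("date", "2020-01-02"), ("title", "a")], [("date", "2019-05-06")], [("date", "2020-07-08")]]
def Spec_group_by_year (stories : List (List (String × String))) (out : List (String × (List (List (String × String))))) : Prop := out = group_by_year_alt stories
instance (stories : List (List (String × String))) (out : List (String × (List (List (String × String))))) : Decidable (Spec_group_by_year stories out) := by unfold Spec_group_by_year; infer_instance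

-- ===== CLAIM (what is proved, stated in full; the proofs are below) =====
def Claim_equal_group_by_year : Prop := ∀ (stories : List (List (String × String))), Dom_group_by_year stories → Pre_group_by_year stories → Spec_group_by_year stories (group_by_year stories)

-- ===== LEMMAS AND PROOFS =====

-- the insert-if-absent followed by modify is one modify (modify inserts f dflt at the end when the key is absent)
theorem pv_step_eq (g : PySem.Dict String (List (List (String × String)))) (y : String)
    (story : List (String × String)) :
    (if g.contains y then g else g.insert y ([] : List (List (String × String)))).modify y [] (fun v => v ++ [story])
      = g.modify y [] (fun v => v ++ [story]) := by
  by_cases h : g.contains y = true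
  · simp [h]
  · simp only [h, if_false, Bool.false_eq_true]
    simp only [PySem.Dict.modify]
    rw [PySem.Dict.getD_insert_self, PySem.Dict.insert_insert_self,
        PySem.Dict.getD_of_not_contains _ _ (by simpa using h)]

theorem pv_fold_eq (stories : List (List (String × String))) :
    (stories.foldl (fun grouped story =>
        let year := pvYearOf story
        let grouped := if grouped.contains year then grouped else grouped.insert year ([] : List (List (String × String)))
        grouped.modify year [] (fun v => v ++ [story]))
      PySem.Dict.empty)
    = ((stories.map (fun s => (pvYearOf s, s))).foldl
        (fun d p => d.modify p.1 [] (fun v => v ++ [p.2])) PySem.Dict.empty) := by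
  rw [List.foldl_map]
  apply PySem.List.foldl_congr_mem
  intro d s _
  exact pv_step_eq d (pvYearOf s) s

theorem group_by_year_spec : Claim_equal_group_by_year := by
  intro stories _ _
  unfold Spec_group_by_year group_by_year group_by_year_alt
  rw [pv_fold_eq]
  have hnd : (((stories.map (fun s => (pvYearOf s, s))).foldl
      (fun d p => d.modify p.1 [] (fun v => v ++ [p.2])) PySem.Dict.empty)).keys.Nodup := by
    have := PySem.Dict.nodup_keys_foldl_modify_key (stories.map (fun s => (pvYearOf s, s)))
      (fun p => p.1) ([] : List (List (String × String)))
      (fun d p v => v ++ [p.2]) PySem.Dict.empty (by simp [PySem.Dict.keys_empty])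
    simpa using this
  rw [PySem.Dict.items_eq_map_keys _ hnd []]
  have hkeys : (((stories.map (fun s => (pvYearOf s, s))).foldl
      (fun d p => d.modify p.1 [] (fun v => v ++ [p.2])) PySem.Dict.empty)).keys
      = PySem.List.dedup (stories.map (fun story => pvYearOf story)) := by
    have := PySem.Dict.keys_foldl_modify_key (stories.map (fun s => (pvYearOf s, s)))
      (fun p => p.1) ([] : List (List (String × String)))
      (fun d p v => v ++ [p.2]) PySem.Dict.empty
    rw [this]
    simp [PySem.Dict.keys_empty, PySem.Set.update, PySem.List.dedup_eq_ofList,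
      PySem.Set.ofList_eq_foldl, List.map_map, Function.comp_def]
  rw [hkeys]
  apply List.map_congr_left
  intro y _
  have hg := PySem.Dict.getD_foldl_modify_append
    (stories.map (fun s => (pvYearOf s, s))) PySem.Dict.empty y
  rw [hg, PySem.Dict.getD_empty]
  simp [List.filter_map, Function.comp_def]
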